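-- pv_equiv track=rewrite | github.com/gs-costa/gsc_individual | hackerRank/no_idea.py | happiness
-- ===== SOURCE A (Python) =====
-- def happiness(array_ini, arrayA, arrayB):
--     happy = 0
--     for i in array_ini:
--         if i in arrayA:
--             happy += 1
--         elif i in arrayB:
--             happy -=1
--     return happy
-- ===== SOURCE B (Python) =====
-- def happiness(array_ini, arrayA, arrayB):
--     cnt = {}
--     for i in array_ini:
--         cnt[i] = cnt.get(i, 0) + 1
--     setA = set(arrayA)
--     setB = set(arrayB) - setA
--     return sum(cnt.get(a, 0) for a in setA) - sum(cnt.get(b, 0) for b in setB)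
-- ===== Notes on version B (the rewrite author's own statement) =====
-- stated objective: faster
-- what changed: Replaces the per-element linear membership scans over arrayA/arrayB with a frequency dict of array_ini plus hash sets setA and setB-setA, summing counts over the distinct keys.
import Mathlib
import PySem

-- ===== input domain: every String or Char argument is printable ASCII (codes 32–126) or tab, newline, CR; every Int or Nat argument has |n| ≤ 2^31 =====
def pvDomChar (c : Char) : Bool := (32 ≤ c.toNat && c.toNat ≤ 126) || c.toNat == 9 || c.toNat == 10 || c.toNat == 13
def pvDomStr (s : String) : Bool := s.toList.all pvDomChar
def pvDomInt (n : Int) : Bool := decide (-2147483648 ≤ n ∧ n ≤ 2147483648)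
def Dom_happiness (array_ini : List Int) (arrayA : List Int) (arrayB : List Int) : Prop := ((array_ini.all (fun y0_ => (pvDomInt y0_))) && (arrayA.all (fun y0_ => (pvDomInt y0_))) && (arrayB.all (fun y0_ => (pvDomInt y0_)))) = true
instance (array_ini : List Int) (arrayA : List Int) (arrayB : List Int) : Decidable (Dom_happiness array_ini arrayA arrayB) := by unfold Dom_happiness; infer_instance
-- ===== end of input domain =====

-- B replaces A's per-element linear membership scans with a frequency table of array_ini
-- and set lookups, summing counts over the distinct keys (objective: faster).

-- ===== PORT A =====
def happiness (array_ini : List Int) (arrayA : List Int) (arrayB : List Int) : Int :=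
  array_ini.foldl
    (fun happy i =>
      if i ∈ arrayA then happy + 1
      else if i ∈ arrayB then happy - 1
      else happy) 0

-- ===== PORT B =====
def happiness_alt (array_ini : List Int) (arrayA : List Int) (arrayB : List Int) : Int :=
  let cnt : PySem.Dict Int Int :=
    array_ini.foldl (fun d i => d.insert i (d.getD i 0 + 1)) PySem.Dict.empty
  let setA : PySem.Set Int := PySem.Set.ofList arrayA
  let setB : PySem.Set Int := PySem.Set.diff (PySem.Set.ofList arrayB) setA
  (setA.map (fun a => cnt.getD a 0)).sum - (setB.map (fun b => cnt.getD b 0)).sum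

-- ===== PRECONDITION & SPEC =====
def Spec_happiness (array_ini : List Int) (arrayA : List Int) (arrayB : List Int) (out : Int) : Prop := out = happiness_alt array_ini arrayA arrayB
instance (array_ini : List Int) (arrayA : List Int) (arrayB : List Int) (out : Int) : Decidable (Spec_happiness array_ini arrayA arrayB out) := by unfold Spec_happiness; infer_instance

-- ===== CLAIM (what is proved, stated in full; the proofs are below) =====
def Claim_equal_happiness : Prop := ∀ (array_ini : List Int) (arrayA : List Int) (arrayB : List Int), Dom_happiness array_ini arrayA arrayB → Spec_happiness array_ini arrayA arrayB (happiness array_ini arrayA arrayB)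

-- ===== LEMMAS AND PROOFS =====

/-- Nodup indicator sum: summing `[a = x]` over a duplicate-free list. -/
theorem sum_indicator_single (x : Int) (s : List Int) (hs : s.Nodup) :
    (s.map (fun a => if a = x then (1 : Int) else 0)).sum = if x ∈ s then 1 else 0 := by
  induction s with
  | nil => simp
  | cons y s ihs =>
    rcases List.nodup_cons.mp hs with ⟨hy, hns⟩
    simp only [List.map_cons, List.sum_cons, List.mem_cons, ihs hns]
    by_cases hxy : y = x
    · have hxs : x ∉ s := hxy ▸ hy
      simp [hxy, hxs]
    · have hx : ¬ x = y := fun h => hxy h.symm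
      by_cases hxs : x ∈ s <;> simp [hxy, hxs, hx]

/-- Summing the multiplicity of each distinct key of `s` in `xs` counts the
elements of `xs` that lie in `s`, expressed as a sum of indicators over `xs`. -/
theorem sum_map_count_eq_sum_indicator (s : List Int) (hs : s.Nodup) (xs : List Int) :
    (s.map (fun a => (xs.count a : Int))).sum
      = (xs.map (fun i => if i ∈ s then (1 : Int) else 0)).sum := by
  induction xs with
  | nil => simp
  | cons x xs ih =>
    have hsplit : (s.map (fun a => ((x :: xs).count a : Int))).sum
        = (s.map (fun a => (xs.count a : Int))).sum
          + (s.map (fun a => if a = x then (1 : Int) else 0)).sum := by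
      rw [← List.sum_map_add]
      refine congrArg List.sum (List.map_congr_left ?_)
      intro a _
      rw [List.count_cons]
      by_cases h : a = x
      · simp [h]
      · have h2 : ¬ x = a := fun hh => h hh.symm
        simp [h, h2]
    rw [hsplit, sum_indicator_single x s hs, ih, List.map_cons, List.sum_cons]
    omega

/-- A's loop as a sum of per-element weights. -/
theorem happiness_foldl_eq (arrayA arrayB : List Int) (xs : List Int) (n : Int) :
    xs.foldl (fun happy i =>
        if i ∈ arrayA then happy + 1
        else if i ∈ arrayB then happy - 1
        else happy) n
      = n + (xs.map (fun i =>
          if i ∈ arrayA then (1 : Int) else if i ∈ arrayB then -1 else 0)).sum := by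
  induction xs generalizing n with
  | nil => simp
  | cons x xs ih =>
    simp only [List.foldl_cons, List.map_cons, List.sum_cons, ih]
    split_ifs <;> omega

/-- A pointwise difference of weights lifts to sums over a list. -/
theorem sum_map_eq_sum_map_sub (w u v : Int → Int) (hp : ∀ i, w i = u i - v i)
    (xs : List Int) : (xs.map w).sum = (xs.map u).sum - (xs.map v).sum := by
  induction xs with
  | nil => simp
  | cons x xs ih =>
    simp only [List.map_cons, List.sum_cons, ih, hp x]
    ring

-- ===== VERDICT (by name: the statement is the Claim_ definition above) =====
theorem happiness_spec : Claim_equal_happiness := by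
  intro array_ini arrayA arrayB _
  show happiness array_ini arrayA arrayB = happiness_alt array_ini arrayA arrayB
  unfold happiness
  have halt : happiness_alt array_ini arrayA arrayB
      = ((PySem.Set.ofList arrayA).map (fun a => (array_ini.count a : Int))).sum
        - (((PySem.Set.ofList arrayB).diff (PySem.Set.ofList arrayA)).map
            (fun a => (array_ini.count a : Int))).sum := by
    simp only [happiness_alt, PySem.Dict.foldl_insert_getD_add_one_eq_counter,
      PySem.Dict.getD_counter]
  rw [halt,
    sum_map_count_eq_sum_indicator _ (PySem.Set.nodup_ofList arrayA),
    sum_map_count_eq_sum_indicator _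
      (PySem.Set.nodup_diff _ _ (PySem.Set.nodup_ofList arrayB)),
    happiness_foldl_eq]
  simp only [PySem.Set.mem_ofList, PySem.Set.mem_diff, zero_add]
  exact sum_map_eq_sum_map_sub _ _ _
    (fun i => by by_cases h1 : i ∈ arrayA <;> by_cases h2 : i ∈ arrayB <;> simp [h1, h2])
    array_ini
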